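-- pv_equiv track=rewrite | github.com/parthdevani98/Leetcode_Submistion | Reversing the equation - GFG/reversing-the-equation.py | reverseEqn
-- ===== SOURCE A (Python) =====
-- def reverseEqn(s):
--
--     i=len(s)-1
--     ans=""
--     while(i>=0):
--
--         num=int(s[i])
--
--         j=i-1
--         pw=1
--         while(j>=0 and s[j]>='0' and s[j]<='9'):
--             num=num+int(s[j])*(10**pw)
--             pw+=1
--             j-=1
--
--
--         ans=ans+str(num)
--
--         while(j>=0 and (s[j]<'0' or s[j]>'9')):
--             ans+=s[j]
--             j-=1
--
--         i=j
--
--     return ans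
-- ===== SOURCE B (Python) =====
-- def reverseEqn(s):
--     # One forward pass groups s into tokens (maximal digit runs, single
--     # non-digit chars), then the tokens are emitted in reverse; a digit run is
--     # emitted as str of its numeric value (stripping leading zeros like A).
--     toks = []
--     prev_digit = False
--     for ch in s:
--         d = '0' <= ch <= '9'
--         if d and prev_digit:
--             toks[-1] += ch
--         else:
--             toks.append(ch)
--         prev_digit = d
--     out = []
--     for t in reversed(toks):
--         if '0' <= t[0] <= '9':
--             v = 0
--             for ch in t:
--                 v = 10 * v + (ord(ch) - ord('0'))
--             out.append(str(v))
--         else: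
--             out.append(t)
--     return ''.join(out)
-- ===== Notes on version B (the rewrite author's own statement) =====
-- stated objective: alternative
-- what changed: A scans backwards with nested index-juggling while loops, rebuilding each number from powers of ten and growing the answer by repeated string concatenation; B makes one forward tokenizing pass (maximal digit runs, single non-digit chars), then emits the token list in reverse with a single join.
import Mathlib
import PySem

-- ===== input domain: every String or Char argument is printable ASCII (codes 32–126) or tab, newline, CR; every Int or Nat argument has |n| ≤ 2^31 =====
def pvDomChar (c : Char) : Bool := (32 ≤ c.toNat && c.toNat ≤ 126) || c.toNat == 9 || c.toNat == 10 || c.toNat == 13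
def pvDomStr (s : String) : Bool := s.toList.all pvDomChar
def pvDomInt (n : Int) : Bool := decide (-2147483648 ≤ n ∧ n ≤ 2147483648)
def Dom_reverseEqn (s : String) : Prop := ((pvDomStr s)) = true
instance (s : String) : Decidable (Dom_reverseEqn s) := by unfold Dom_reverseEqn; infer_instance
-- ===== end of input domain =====

-- B replaces A's backward nested-while index scan by a forward tokenizing pass
-- followed by a reversed emit; equivalence is proved on all inputs where A
-- returns (empty string, or last character a digit); elsewhere A raises ValueError.


-- shared one-line char predicate: '0' <= c <= '9'
def pvDigit (c : Char) : Bool := decide ('0' ≤ c ∧ c ≤ '9')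

-- ===== PORT A =====
-- inner while: while j>=0 and s[j]>='0' and s[j]<='9': num += int(s[j])*10**pw; pw += 1; j -= 1
def pvNumLoop (cs : List Char) : Nat → Int → Int → Nat → (Int × Int)
  | 0, j, num, _ => (num, j)
  | fuel+1, j, num, pw =>
    if j < 0 then (num, j) else
    match PySem.List.pyGet? cs j with
    | none => (num, j)
    | some c =>
      if pvDigit c then
        pvNumLoop cs fuel (j - 1) (num + ((PySem.Int.ofChars? [c]).getD 0) * 10 ^ pw) (pw + 1)
      else (num, j)

-- inner while: while j>=0 and (s[j]<'0' or s[j]>'9'): ans += s[j]; j -= 1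
def pvOpsLoop (cs : List Char) : Nat → Int → List Char → (List Char × Int)
  | 0, j, ans => (ans, j)
  | fuel+1, j, ans =>
    if j < 0 then (ans, j) else
    match PySem.List.pyGet? cs j with
    | none => (ans, j)
    | some c =>
      if pvDigit c then (ans, j)
      else pvOpsLoop cs fuel (j - 1) (ans ++ [c])

-- outer while(i>=0); none = the ValueError of num=int(s[i]); fuel covers all iterations
def pvOuterLoop (cs : List Char) : Nat → Int → List Char → Option (List Char)
  | 0, _, ans => some ans
  | fuel+1, i, ans =>
    if i < 0 then some ans else
    match PySem.List.pyGet? cs i with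
    | none => none
    | some c =>
      match PySem.Int.ofChars? [c] with
      | none => none
      | some num0 =>
        let nj := pvNumLoop cs cs.length (i - 1) num0 1
        let aj := pvOpsLoop cs cs.length nj.2 (ans ++ PySem.Int.toChars nj.1)
        pvOuterLoop cs fuel aj.2 aj.1

def reverseEqn (s : String) : String :=
  match pvOuterLoop s.toList (s.toList.length + 1) ((s.toList.length : Int) - 1) [] with
  | some ans => String.ofList ans
  | none => ""   -- only reached where the Python raises ValueError (outside Pre_)

-- ===== PORT B =====
-- forward pass: append ch as a new token, or merge into the last (digit-run) token
def pvStepB (st : List (List Char) × Bool) (ch : Char) : List (List Char) × Bool :=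
  let d := pvDigit ch
  if d && st.2 then (st.1.dropLast ++ [st.1.getLastD [] ++ [ch]], d)
  else (st.1 ++ [[ch]], d)

-- v = 0; for ch in t: v = 10*v + (ord(ch) - ord('0'))
def pvValB (t : List Char) : Int := t.foldl (fun v ch => 10 * v + ((ch.toNat : Int) - 48)) 0

def pvEmitB (t : List Char) : List Char :=
  if pvDigit (t.headD ' ') then PySem.Int.toChars (pvValB t) else t

def reverseEqn_alt (s : String) : String :=
  String.ofList (PySem.Chars.join [] (((s.toList.foldl pvStepB ([], false)).1.reverse).map pvEmitB))

-- ===== PRECONDITION & SPEC =====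
-- Pre_ excludes exactly the inputs where A raises ValueError: a non-empty string
-- whose last character is not a digit (A calls int() on it).
def Pre_reverseEqn (s : String) : Prop := pvDigit (s.toList.getLastD '0') = true
instance (s : String) : Decidable (Pre_reverseEqn s) := by unfold Pre_reverseEqn; infer_instance

def pvWitness_reverseEqn : String := "12+3"

def Spec_reverseEqn (s : String) (out : String) : Prop := out = reverseEqn_alt s
instance (s : String) (out : String) : Decidable (Spec_reverseEqn s out) := by unfold Spec_reverseEqn; infer_instance

-- ===== CLAIM (what is proved, stated in full; the proofs are below) =====
def Claim_equal_reverseEqn : Prop := ∀ (s : String), Dom_reverseEqn s → Pre_reverseEqn s → Spec_reverseEqn s (reverseEqn s)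

-- ===== LEMMAS AND PROOFS =====

-- B's token list and B's emitted answer, as functions of the char list
def pvToksB (p : List Char) : List (List Char) := (p.foldl pvStepB ([], false)).1
def pvR (p : List Char) : List Char := PySem.Chars.join [] ((pvToksB p).reverse.map pvEmitB)

theorem join_nil_eq_flatten (parts : List (List Char)) : PySem.Chars.join [] parts = parts.flatten := by
  simp [PySem.Chars.join, List.intercalate]
  induction parts with
  | nil => rfl
  | cons a t ih => cases t with
    | nil => simp
    | cons b t2 => simp_all [List.intersperse]

theorem digit_ofChars (c : Char) (h : pvDigit c = true) :
    PySem.Int.ofChars? [c] = some ((c.toNat : Int) - 48) := by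
  simp [pvDigit, Char.le_def, UInt32.le_iff_toNat_le] at h
  have hc : c = Char.ofNat c.toNat := (Char.ofNat_toNat c).symm
  obtain ⟨h1, h2⟩ := h
  interval_cases hn : c.toNat <;> rw [hc] <;> decide

theorem pyGet_at (xs ys : List Char) (e : Char) :
    PySem.List.pyGet? (xs ++ e :: ys) ((xs.length : Nat) : Int) = some e := by
  simp [pysem]

theorem pvValB_concat (E : List Char) (e : Char) :
    pvValB (E ++ [e]) = 10 * pvValB E + ((e.toNat : Int) - 48) := by
  simp [pvValB, List.foldl_append]

theorem pvNumLoop_run (E : List Char) : ∀ (q F : List Char) (fuel : Nat) (num : Int) (pw : Nat),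
    E.all pvDigit = true →
    (q = [] ∨ ∃ q0 c, q = q0 ++ [c] ∧ pvDigit c = false) →
    E.length < fuel →
    pvNumLoop (q ++ (E ++ F)) fuel ((q.length : Int) + E.length - 1) num pw
      = (num + pvValB E * 10 ^ pw, (q.length : Int) - 1) := by
  induction E using List.reverseRecOn with
  | nil =>
    intro q F fuel num pw _ hq hf
    cases fuel with
    | zero => omega
    | succ f =>
      rcases hq with rfl | ⟨q0, c, rfl, hc⟩
      · simp [pvNumLoop, pvValB]
      · have hj : ((q0 ++ [c]).length : Int) + ([] : List Char).length - 1 = (q0.length : Nat) := by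
          simp
        rw [hj]
        simp [pvNumLoop, hc, pvValB]
  | append_singleton E' e ih =>
    intro q F fuel num pw hall hq hf
    simp only [List.all_append, List.all_cons, List.all_nil, Bool.and_eq_true] at hall
    cases fuel with
    | zero => simp at hf
    | succ f =>
      have hj : ((q.length : Int) + (E' ++ [e]).length - 1) = ((q ++ E').length : Nat) := by
        simp only [List.length_append, List.length_cons, List.length_nil]; push_cast; omega
      have hsplit : q ++ ((E' ++ [e]) ++ F) = (q ++ E') ++ (e :: F) := by simp
      rw [hj, hsplit]
      have hget := pyGet_at (q ++ E') F e
      simp only [pvNumLoop, hget]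
      rw [if_neg (by omega : ¬((((q ++ E').length : Nat) : Int) < 0)), digit_ofChars e hall.2.1]
      have hsplit2 : (q ++ E') ++ (e :: F) = q ++ (E' ++ ([e] ++ F)) := by simp
      have hj2 : (((q ++ E').length : Nat) : Int) - 1 = (q.length : Int) + E'.length - 1 := by
        simp only [List.length_append]; push_cast; omega
      rw [if_pos hall.2.1]
      simp only [Option.getD_some]
      rw [hsplit2, hj2, ih q ([e] ++ F) f _ _ hall.1 hq (by simp at hf ⊢; omega)]
      have hv : num + ((e.toNat : Int) - 48) * 10 ^ pw + pvValB E' * 10 ^ (pw + 1)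
           = num + pvValB (E' ++ [e]) * 10 ^ pw := by
        rw [pvValB_concat]; ring
      rw [hv]

theorem pvOpsLoop_run (O : List Char) : ∀ (q F ans : List Char) (fuel : Nat),
    O.all (fun c => !pvDigit c) = true →
    (q = [] ∨ ∃ q0 c, q = q0 ++ [c] ∧ pvDigit c = true) →
    O.length < fuel →
    pvOpsLoop (q ++ (O ++ F)) fuel ((q.length : Int) + O.length - 1) ans
      = (ans ++ O.reverse, (q.length : Int) - 1) := by
  induction O using List.reverseRecOn with
  | nil =>
    intro q F ans fuel _ hq hf
    cases fuel with
    | zero => omega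
    | succ f =>
      rcases hq with rfl | ⟨q0, c, rfl, hc⟩
      · simp [pvOpsLoop]
      · have hj : ((q0 ++ [c]).length : Int) + ([] : List Char).length - 1 = (q0.length : Nat) := by
          simp
        rw [hj]
        simp [pvOpsLoop, hc]
  | append_singleton O' e ih =>
    intro q F ans fuel hall hq hf
    simp only [List.all_append, List.all_cons, List.all_nil, Bool.and_eq_true,
      Bool.not_eq_true'] at hall
    cases fuel with
    | zero => simp at hf
    | succ f =>
      have hj : ((q.length : Int) + (O' ++ [e]).length - 1) = ((q ++ O').length : Nat) := by
        simp only [List.length_append, List.length_cons, List.length_nil]; push_cast; omega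
      have hsplit : q ++ ((O' ++ [e]) ++ F) = (q ++ O') ++ (e :: F) := by simp
      rw [hj, hsplit]
      have hget := pyGet_at (q ++ O') F e
      simp only [pvOpsLoop, hget]
      rw [if_neg (by omega : ¬((((q ++ O').length : Nat) : Int) < 0)), if_neg (by simp [hall.2.1])]
      have hsplit2 : (q ++ O') ++ (e :: F) = q ++ (O' ++ ([e] ++ F)) := by simp
      have hj2 : (((q ++ O').length : Nat) : Int) - 1 = (q.length : Int) + O'.length - 1 := by
        simp only [List.length_append]; push_cast; omega
      rw [hsplit2, hj2, ih q ([e] ++ F) (ans ++ [e]) f hall.1 hq (by simp at hf ⊢; omega)]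
      simp

theorem tokB_digits (D : List Char) : ∀ (toks : List (List Char)) (r : List Char),
    D.all pvDigit = true →
    List.foldl pvStepB (toks ++ [r], true) D = (toks ++ [r ++ D], true) := by
  induction D with
  | nil => intro toks r _; simp
  | cons c D' ih =>
    intro toks r hall
    simp only [List.all_cons, Bool.and_eq_true] at hall
    simp only [List.foldl_cons, pvStepB, hall.1, Bool.true_and, if_true,
      List.dropLast_concat, List.getLastD_concat]
    rw [ih toks (r ++ [c]) hall.2]
    simp

theorem tokB_digits0 (D : List Char) (toks : List (List Char))
    (hD : D.all pvDigit = true) (hne : D ≠ []) :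
    List.foldl pvStepB (toks, false) D = (toks ++ [D], true) := by
  cases D with
  | nil => exact absurd rfl hne
  | cons c D' =>
    simp only [List.all_cons, Bool.and_eq_true] at hD
    simp only [List.foldl_cons, pvStepB, hD.1, Bool.and_false, Bool.false_eq_true, if_false]
    rw [tokB_digits D' toks [c] hD.2]
    simp

theorem tokB_ops (O : List Char) : ∀ (toks : List (List Char)) (b : Bool),
    O.all (fun c => !pvDigit c) = true →
    List.foldl pvStepB (toks, b) O
      = (toks ++ O.map (fun c => [c]), if O.isEmpty then b else false) := by
  induction O with
  | nil => intro toks b _; simp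
  | cons c O' ih =>
    intro toks b hall
    simp only [List.all_cons, Bool.and_eq_true, Bool.not_eq_true'] at hall
    simp only [List.foldl_cons, pvStepB, hall.1, Bool.false_and, Bool.false_eq_true, if_false]
    rw [ih (toks ++ [[c]]) false hall.2]
    simp

theorem emit_single (c : Char) (hc : pvDigit c = false) : pvEmitB [c] = [c] := by
  simp [pvEmitB, hc]

theorem pvR_decomp (p' O D : List Char)
    (hO : O.all (fun c => !pvDigit c) = true) (hD : D.all pvDigit = true) (hDne : D ≠ [])
    (hOe : O = [] → p' = []) :
    pvR (p' ++ O ++ D) = pvEmitB D ++ O.reverse ++ pvR p' := by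
  have hmapO : ∀ (xs : List Char), xs.all (fun c => !pvDigit c) = true →
      (xs.map (fun c => [c])).map pvEmitB = xs.map (fun c => [c]) := by
    intro xs hxs
    rw [List.map_map]
    apply List.map_congr_left
    intro c hc
    have : pvDigit c = false := by
      have := List.all_eq_true.mp hxs c hc; simpa using this
    simp [Function.comp, emit_single c this]
  by_cases hOnil : O = []
  · have hp : p' = [] := hOe hOnil
    subst hOnil hp
    simp only [List.nil_append]
    unfold pvR pvToksB
    rw [List.foldl_nil] at *
    rw [tokB_digits0 D [] hD hDne]
    simp [PySem.Chars.join_nil]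
  · unfold pvR pvToksB
    rw [List.foldl_append, List.foldl_append]
    have hst : List.foldl pvStepB ([], false) p'
        = ((List.foldl pvStepB ([], false) p').1, (List.foldl pvStepB ([], false) p').2) := rfl
    rw [hst, tokB_ops O _ _ hO, if_neg (by simpa using hOnil), tokB_digits0 _ _ hD hDne]
    simp only [List.reverse_append, List.reverse_cons, List.reverse_nil, List.nil_append,
      List.map_append, List.map_cons, List.map_nil, join_nil_eq_flatten, List.flatten_append,
      List.flatten_cons, List.flatten_nil, List.append_nil]
    rw [← List.map_reverse, hmapO O.reverse (by simpa using hO),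
      ← join_nil_eq_flatten, PySem.Chars.join_nil_singletons, List.append_assoc]

theorem pvDropWhileHead {P : Char → Bool} : ∀ {l : List Char} {c : Char} {t : List Char},
    l.dropWhile P = c :: t → P c = false := by
  intro l
  induction l with
  | nil => intro c t h; simp at h
  | cons a l ih =>
    intro c t h
    rw [List.dropWhile_cons] at h
    by_cases hP : P a
    · rw [if_pos hP] at h; exact ih h
    · rw [if_neg hP] at h
      injection h with h1 _
      subst h1; simpa using hP

-- decomposition of a non-empty char list ending in a digit: prefix (empty or
-- ending in a digit), maximal non-digit run, maximal trailing digit run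
theorem pvSplit (p : List Char) (hpe : p ≠ []) (hlast : pvDigit (p.getLastD '0') = true) :
    ∃ pA O D, p = pA ++ O ++ D ∧
      O.all (fun c => !pvDigit c) = true ∧ D.all pvDigit = true ∧
      (O = [] → pA = []) ∧
      (pA = [] ∨ ∃ q0 c, pA = q0 ++ [c] ∧ pvDigit c = true) ∧
      (O = [] ∨ ∃ q0 c, O = q0 ++ [c] ∧ pvDigit c = false) ∧
      (∃ Dl dd, D = Dl ++ [dd]) := by
  have hheadd : pvDigit (p.reverse.headD '0') = true := by
    have hh : p.getLastD '0' = p.reverse.headD '0' := by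
      rw [List.getLastD_eq_getLast?, List.getLast?_eq_head?_reverse, List.headD_eq_head?]
    rw [← hh]; exact hlast
  have hq'eq : p.reverse.takeWhile pvDigit ++ p.reverse.dropWhile pvDigit = p.reverse :=
    List.takeWhile_append_dropWhile
  obtain ⟨dc, Dt, hD0⟩ : ∃ c t, p.reverse.takeWhile pvDigit = c :: t := by
    cases hpr : p.reverse with
    | nil => exact absurd (by simpa using congrArg List.reverse hpr) hpe
    | cons c t =>
      have hc : pvDigit c = true := by rw [hpr] at hheadd; simpa using hheadd
      refine ⟨c, t.takeWhile pvDigit, ?_⟩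
      simp [hc]
  set q' := p.reverse.dropWhile pvDigit with hq'def
  have hsplit2 : q'.takeWhile (fun c => !pvDigit c) ++ q'.dropWhile (fun c => !pvDigit c) = q' :=
    List.takeWhile_append_dropWhile
  refine ⟨(q'.dropWhile (fun c => !pvDigit c)).reverse,
          (q'.takeWhile (fun c => !pvDigit c)).reverse,
          (p.reverse.takeWhile pvDigit).reverse, ?_, ?_, ?_, ?_, ?_, ?_, ?_⟩
  · have h4 : q'.reverse = (q'.dropWhile (fun c => !pvDigit c)).reverse
        ++ (q'.takeWhile (fun c => !pvDigit c)).reverse := by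
      conv_lhs => rw [← hsplit2]
      rw [List.reverse_append]
    have h5 : p = q'.reverse ++ (List.takeWhile pvDigit p.reverse).reverse := by
      have h6 := congrArg List.reverse hq'eq
      rw [List.reverse_append] at h6
      rw [h6, List.reverse_reverse]
    conv_lhs => rw [h5, h4]
  · rw [List.all_eq_true]; intro c hc
    rw [List.mem_reverse] at hc
    exact List.mem_takeWhile_imp (p := fun c => !pvDigit c) hc
  · rw [List.all_eq_true]; intro c hc
    rw [List.mem_reverse] at hc
    exact List.mem_takeWhile_imp (p := pvDigit) hc
  · intro h0
    have hO'0 : q'.takeWhile (fun c => !pvDigit c) = [] := by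
      simpa using congrArg List.reverse h0
    have hq'0 : q' = [] := by
      cases hq0 : q' with
      | nil => rfl
      | cons c t =>
        exfalso
        have hc : pvDigit c = false := pvDropWhileHead (hq'def ▸ hq0)
        rw [hq0, List.takeWhile_cons, if_pos (by simp [hc])] at hO'0
        simp at hO'0
    simp [hq'0]
  · cases hP0 : q'.dropWhile (fun c => !pvDigit c) with
    | nil => left; simp
    | cons c t =>
      right
      have hc : pvDigit c = true := by
        have := pvDropWhileHead hP0; simpa using this
      exact ⟨t.reverse, c, by simp, hc⟩
  · cases hO0 : q'.takeWhile (fun c => !pvDigit c) with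
    | nil => left; simp
    | cons c t =>
      right
      have hc : pvDigit c = false := by
        have hmem : c ∈ q'.takeWhile (fun c => !pvDigit c) := by rw [hO0]; simp
        have := List.mem_takeWhile_imp (p := fun c => !pvDigit c) hmem
        simpa using this
      exact ⟨t.reverse, c, by simp, hc⟩
  · exact ⟨Dt.reverse, dc, by rw [hD0]; simp⟩

theorem pvOuterLoop_run : ∀ (n : Nat) (p : List Char), p.length ≤ n →
    ∀ (F ans : List Char) (fuel : Nat),
    p.length < fuel →
    (p = [] ∨ pvDigit (p.getLastD '0') = true) →
    pvOuterLoop (p ++ F) fuel ((p.length : Int) - 1) ans = some (ans ++ pvR p) := by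
  intro n
  induction n with
  | zero =>
    intro p hp F ans fuel hf _
    have hpe : p = [] := List.eq_nil_of_length_eq_zero (by omega)
    subst hpe
    cases fuel with
    | zero => omega
    | succ f => simp [pvOuterLoop, pvR, pvToksB, PySem.Chars.join_nil]
  | succ n ih =>
    intro p hp F ans fuel hf hlast
    by_cases hpe : p = []
    · subst hpe
      cases fuel with
      | zero => omega
      | succ f => simp [pvOuterLoop, pvR, pvToksB, PySem.Chars.join_nil]
    · obtain ⟨pA, O, D, hpdecomp, hOall, hDall, hOe, hpAcond, hOlast, Dl, d, hDsplit⟩ :=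
        pvSplit p hpe (hlast.resolve_left hpe)
      have hDne : D ≠ [] := by rw [hDsplit]; simp
      have hd : pvDigit d = true := by
        have : d ∈ D := by rw [hDsplit]; simp
        exact List.all_eq_true.mp hDall _ this
      have hDlall : Dl.all pvDigit = true := by
        rw [List.all_eq_true]; intro c hc
        exact List.all_eq_true.mp hDall _ (by rw [hDsplit]; simp [hc])
      have hqcond : pA ++ O = [] ∨ ∃ q0 c, pA ++ O = q0 ++ [c] ∧ pvDigit c = false := by
        rcases hOlast with rfl | ⟨q0, c, hO, hc⟩
        · left; simp [hOe rfl]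
        · right; exact ⟨pA ++ q0, c, by rw [hO, List.append_assoc], hc⟩
      have hval : ((d.toNat : Int) - 48) + pvValB Dl * 10 ^ 1 = pvValB D := by
        rw [hDsplit, pvValB_concat]; ring
      cases fuel with
      | zero => omega
      | succ f =>
        have hlenp : p.length = pA.length + O.length + Dl.length + 1 := by
          rw [hpdecomp, hDsplit]
          simp only [List.length_append, List.length_cons, List.length_nil]
          omega
        have hcs : p ++ F = (pA ++ O ++ Dl) ++ (d :: F) := by
          rw [hpdecomp, hDsplit]; simp
        have hilen : ((p.length : Int) - 1) = (((pA ++ O ++ Dl).length : Nat) : Int) := by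
          simp only [List.length_append]; rw [hlenp]; push_cast; omega
        have hnn : ¬ ((((pA ++ O ++ Dl).length : Nat) : Int) < 0) := by omega
        rw [hcs, hilen]
        simp only [pvOuterLoop]
        rw [if_neg hnn]
        simp only [pyGet_at, digit_ofChars d hd]
        have hnumlist : (pA ++ O ++ Dl) ++ (d :: F) = (pA ++ O) ++ (Dl ++ ([d] ++ F)) := by simp
        have hnumidx : (((pA ++ O ++ Dl).length : Nat) : Int) - 1
            = (((pA ++ O).length : Nat) : Int) + (Dl.length : Int) - 1 := by
          simp only [List.length_append]; push_cast; omega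
        rw [hnumlist, hnumidx,
          pvNumLoop_run Dl (pA ++ O) ([d] ++ F) _ _ _ hDlall hqcond
            (by simp only [List.length_append, List.length_cons, List.length_nil]; omega)]
        rw [hval]
        have hopslist : (pA ++ O) ++ (Dl ++ ([d] ++ F)) = pA ++ (O ++ (D ++ F)) := by
          rw [hDsplit]; simp
        have hopsidx : (((pA ++ O).length : Nat) : Int) - 1
            = (pA.length : Int) + (O.length : Int) - 1 := by
          simp only [List.length_append]; push_cast; omega
        rw [hopslist, hopsidx,
          pvOpsLoop_run O pA (D ++ F) _ _ hOall hpAcond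
            (by rw [hDsplit]
                simp only [List.length_append, List.length_cons, List.length_nil]; omega)]
        have hrest : pA ++ (O ++ (D ++ F)) = pA ++ (O ++ D ++ F) := by simp
        have hpAlast : pA = [] ∨ pvDigit (pA.getLastD '0') = true := by
          rcases hpAcond with rfl | ⟨q0, c, hq, hc⟩
          · left; rfl
          · right; rw [hq, List.getLastD_concat]; exact hc
        have hpAlen : pA.length ≤ n ∧ pA.length < f := by
          constructor <;> omega
        rw [hrest, ih pA hpAlen.1 (O ++ D ++ F) _ f hpAlen.2 hpAlast]
        have hemit : pvEmitB D = PySem.Int.toChars (pvValB D) := by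
          cases hD0 : D with
          | nil => exact absurd hD0 hDne
          | cons c t =>
            have hc : pvDigit c = true :=
              List.all_eq_true.mp hDall c (by rw [hD0]; simp)
            simp [pvEmitB, hc]
        rw [hpdecomp, pvR_decomp pA O D hOall hDall hDne hOe, hemit]
        simp [List.append_assoc]

-- ===== VERDICT (by name: the statement is the Claim_ definition above) =====
theorem reverseEqn_spec : Claim_equal_reverseEqn := by
  intro s _ hpre
  unfold Spec_reverseEqn
  unfold Pre_reverseEqn at hpre
  have h := pvOuterLoop_run s.toList.length s.toList le_rfl [] [] (s.toList.length + 1)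
    (by omega) (Or.inr hpre)
  rw [List.append_nil] at h
  unfold reverseEqn
  rw [h]
  simp only [List.nil_append]
  rfl
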